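-- pv_equiv track=rewrite | github.com/KevinCarr42/AI-Translation-Pipeline | src/scitrans/translate/utils.py | reassemble_chunks
-- ===== SOURCE A (Python) =====
-- def reassemble_chunks(translated_chunks, chunk_metadata):
--     lines_dict = {}
--     for chunk, metadata in zip(translated_chunks, chunk_metadata):
--         line_idx = metadata['line_idx']
--         lines_dict.setdefault(line_idx, []).append(chunk)
--
--     for line_idx, parts in lines_dict.items():
--         if isinstance(parts, list):
--             lines_dict[line_idx] = ' '.join(parts)
--
--     return '\n'.join(lines_dict[i] for i in sorted(lines_dict.keys()))
-- ===== SOURCE B (Python) =====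
-- def reassemble_chunks(translated_chunks, chunk_metadata):
--     pairs = [(m['line_idx'], c) for c, m in zip(translated_chunks, chunk_metadata)]
--     return '\n'.join(
--         ' '.join(c for i, c in pairs if i == k)
--         for k in sorted({i for i, _ in pairs})
--     )
-- ===== Notes on version B (the rewrite author's own statement) =====
-- stated objective: simpler
-- what changed: Replaces A's dict-based grouping (setdefault/append, an in-place value-rewriting pass, then a lookup per sorted key) with a single pair list plus a comprehension over sorted(set(line indices)) that filters the pairs per line; no dict is built or mutated.
import Mathlib
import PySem

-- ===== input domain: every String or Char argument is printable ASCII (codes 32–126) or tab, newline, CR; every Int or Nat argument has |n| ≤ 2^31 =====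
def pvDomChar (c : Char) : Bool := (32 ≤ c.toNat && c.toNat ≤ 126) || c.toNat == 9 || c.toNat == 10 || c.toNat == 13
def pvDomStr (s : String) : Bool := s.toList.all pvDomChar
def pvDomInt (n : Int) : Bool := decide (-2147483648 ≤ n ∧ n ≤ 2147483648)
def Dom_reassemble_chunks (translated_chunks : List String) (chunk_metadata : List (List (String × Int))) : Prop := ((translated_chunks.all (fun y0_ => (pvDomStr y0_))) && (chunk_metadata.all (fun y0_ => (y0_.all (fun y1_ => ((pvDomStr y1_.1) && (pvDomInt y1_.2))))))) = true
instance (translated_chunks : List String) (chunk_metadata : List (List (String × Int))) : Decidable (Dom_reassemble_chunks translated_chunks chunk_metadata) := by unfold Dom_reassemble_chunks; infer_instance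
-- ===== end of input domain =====

-- B replaces A's dict grouping (setdefault/append, a value-rewriting pass, lookups per sorted key)
-- by a comprehension over sorted(set(line indices)) filtering an (index, chunk) pair list: simpler, no dict.


-- metadata['line_idx']: first-match lookup in the metadata association list; the default 0 is never
-- used under Pre_ (which requires the key to be present), where the Python raises KeyError.
def pvLineIdx (m : List (String × Int)) : Int :=
  ((PySem.Dict.mk m).get? "line_idx").getD 0

-- ===== PORT A =====
-- The second Python loop rewrites each dict value in place from List String to a joined String
-- (the isinstance test is always true there: every stored value is a list); since a Lean Dict is
-- homogeneous it is ported as building a second dict by inserting the items in their order, which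
-- produces the same keys in the same order with the joined values.
def reassemble_chunks (translated_chunks : List String) (chunk_metadata : List (List (String × Int))) : String :=
  let lines_dict : PySem.Dict Int (List String) :=
    (translated_chunks.zip chunk_metadata).foldl
      (fun d p => d.modify (pvLineIdx p.2) [] (fun l => l ++ [p.1])) PySem.Dict.empty
  let lines_dict2 : PySem.Dict Int String :=
    lines_dict.items.foldl (fun d q => d.insert q.1 (PySem.Str.join " " q.2)) PySem.Dict.empty
  PySem.Str.join "\n"
    ((PySem.List.sorted lines_dict2.keys (fun x => x) false).map (fun i => lines_dict2.getD i ""))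

-- ===== PORT B =====
def reassemble_chunks_alt (translated_chunks : List String) (chunk_metadata : List (List (String × Int))) : String :=
  let pairs : List (Int × String) :=
    (translated_chunks.zip chunk_metadata).map (fun p => (pvLineIdx p.2, p.1))
  PySem.Str.join "\n"
    ((PySem.List.sorted (PySem.Set.ofList (pairs.map (fun q => q.1))) (fun x => x) false).map
      (fun k => PySem.Str.join " " ((pairs.filter (fun q => q.1 == k)).map (fun q => q.2))))

-- ===== PRECONDITION & SPEC =====
-- Pre_ excludes exactly the inputs where the Python A raises KeyError: a metadata dict within
-- zip range lacking the 'line_idx' key (B raises there too).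
def Pre_reassemble_chunks (translated_chunks : List String) (chunk_metadata : List (List (String × Int))) : Prop :=
  ∀ p ∈ translated_chunks.zip chunk_metadata, (PySem.Dict.mk p.2).contains "line_idx" = true
instance (translated_chunks : List String) (chunk_metadata : List (List (String × Int))) : Decidable (Pre_reassemble_chunks translated_chunks chunk_metadata) := by unfold Pre_reassemble_chunks; infer_instance

def pvWitness_reassemble_chunks : List String × (List (List (String × Int))) :=
  (["hello", "big", "world"], [[("line_idx", 1)], [("line_idx", 0)], [("line_idx", 1)]])

def Spec_reassemble_chunks (translated_chunks : List String) (chunk_metadata : List (List (String × Int))) (out : String) : Prop := out = reassemble_chunks_alt translated_chunks chunk_metadata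
instance (translated_chunks : List String) (chunk_metadata : List (List (String × Int))) (out : String) : Decidable (Spec_reassemble_chunks translated_chunks chunk_metadata out) := by unfold Spec_reassemble_chunks; infer_instance

-- ===== CLAIM (what is proved, stated in full; the proofs are below) =====
def Claim_equal_reassemble_chunks : Prop := ∀ (translated_chunks : List String) (chunk_metadata : List (List (String × Int))), Dom_reassemble_chunks translated_chunks chunk_metadata → Pre_reassemble_chunks translated_chunks chunk_metadata → Spec_reassemble_chunks translated_chunks chunk_metadata (reassemble_chunks translated_chunks chunk_metadata)

-- ===== LEMMAS AND PROOFS =====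

-- The two ports agree on every input (the ports totalise the KeyError lookup identically via
-- pvLineIdx, so no hypothesis is needed here).
theorem reassemble_chunks_eq (translated_chunks : List String)
    (chunk_metadata : List (List (String × Int))) :
    reassemble_chunks translated_chunks chunk_metadata
      = reassemble_chunks_alt translated_chunks chunk_metadata := by
  unfold reassemble_chunks reassemble_chunks_alt
  set z := translated_chunks.zip chunk_metadata with hz
  set ps : List (Int × String) := z.map (fun p => (pvLineIdx p.2, p.1)) with hps
  set d : PySem.Dict Int (List String) :=
    z.foldl (fun d p => d.modify (pvLineIdx p.2) [] (fun l => l ++ [p.1])) PySem.Dict.empty with hd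
  -- the grouping fold over z is the canonical pair fold over ps
  have hfold : d = ps.foldl (fun d p => d.modify p.1 [] (fun l => l ++ [p.2])) PySem.Dict.empty := by
    rw [hps, List.foldl_map]
  -- keys of d
  have hkeys : d.keys = PySem.Set.ofList (ps.map (fun q => q.1)) := by
    rw [hd, PySem.Dict.keys_foldl_modify_key z (fun p => pvLineIdx p.2) []
          (fun _ p => (fun l => l ++ [p.1])) PySem.Dict.empty,
        PySem.Dict.keys_empty, PySem.Set.update_nil_left, hps, List.map_map]
    rfl
  have hnd : d.keys.Nodup := by
    rw [hkeys]; exact PySem.Set.nodup_ofList _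
  -- values of d
  have hget : ∀ k : Int, d.getD k [] = (ps.filter (fun q => q.1 == k)).map (fun q => q.2) := by
    intro k
    rw [hfold, PySem.Dict.getD_foldl_modify_append ps PySem.Dict.empty k,
        PySem.Dict.getD_empty, List.nil_append]
  -- the rewritten dict: same keys, joined values
  set d2 : PySem.Dict Int String :=
    d.items.foldl (fun e q => e.insert q.1 (PySem.Str.join " " q.2)) PySem.Dict.empty with hd2
  have hitems2 : d2.items = d.keys.map (fun k => (k, PySem.Str.join " " (d.getD k []))) := by
    rw [hd2, PySem.Dict.items_foldl_insert_fresh d.items (fun q => q.1)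
          (fun q => PySem.Str.join " " q.2) PySem.Dict.empty
          (fun a _ => PySem.Dict.contains_empty a.1) hnd]
    rw [PySem.Dict.items_eq_map_keys d hnd [], List.map_map]
    simp [Function.comp_def, PySem.Dict.empty]
  have hkeys2 : d2.keys = d.keys := by
    show d2.items.map (fun q => q.1) = d.keys
    rw [hitems2, List.map_map]
    simp [Function.comp_def]
  have hnd2 : d2.keys.Nodup := by rw [hkeys2]; exact hnd
  have hget2 : ∀ k ∈ d.keys, d2.getD k "" = PySem.Str.join " " (d.getD k []) := by
    intro k hk
    exact PySem.Dict.getD_of_mem_items d2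
      (by rw [hitems2]; exact List.mem_map_of_mem hk) hnd2 ""
  -- assemble
  show PySem.Str.join "\n"
      ((PySem.List.sorted d2.keys (fun x => x) false).map (fun i => d2.getD i ""))
    = PySem.Str.join "\n"
      ((PySem.List.sorted (PySem.Set.ofList (ps.map (fun q => q.1))) (fun x => x) false).map
        (fun k => PySem.Str.join " " ((ps.filter (fun q => q.1 == k)).map (fun q => q.2))))
  rw [hkeys2, ← hkeys]
  congr 1
  refine List.map_congr_left (fun i hi => ?_)
  have hi' : i ∈ d.keys := (PySem.List.mem_sorted d.keys (fun x => x) false i).mp hi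
  rw [hget2 i hi', hget i]

theorem reassemble_chunks_spec : Claim_equal_reassemble_chunks := by
  intro tc md _ _
  show _ = _
  exact reassemble_chunks_eq tc md
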